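-- pv_equiv track=rewrite | github.com/jaewan96/BaekjoonHub | Python3/프로그래머스/3/12987. 숫자 게임/숫자 게임.py | solution
-- ===== SOURCE A (Python) =====
-- def solution(A, B):
--     answer = 0
--     A.sort()
--     B.sort()
--     i, j = 0, 0
--     while i < len(A) and j < len(B):
--         if B[j] > A[i]:
--             j += 1
--             i += 1
--             answer +=1
--         else:
--             j += 1
--     return answer
-- ===== SOURCE B (Python) =====
-- def solution(A, B):
--     # Hall-deficiency method: the maximum number of wins equals len(B) minus the
--     # largest "overload" max(0, max_j ((j+1) - #{a in A : a < B[j]})) over sorted B: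
--     # B cards that cannot all win because too few A cards lie strictly below them.
--     # No pairing is ever constructed. Sorts A and B ascending in place, like the
--     # original.
--     A.sort()
--     B.sort()
--     worst = 0
--     for j, b in enumerate(B):
--         # number of A cards strictly below b, by binary search in sorted A
--         lo, hi = 0, len(A)
--         while lo < hi:
--             mid = (lo + hi) // 2
--             if A[mid] < b:
--                 lo = mid + 1
--             else:
--                 hi = mid
--         d = (j + 1) - lo
--         if d > worst:
--             worst = d
--     return len(B) - worst
-- ===== Notes on version B (the rewrite author's own statement) =====
-- stated objective: alternative
-- what changed: Replaces the greedy matching scan with a Hall-deficiency computation: for each card of sorted B it counts by binary search how many A cards lie strictly below it, takes the maximum overload (j+1)-count over these prefixes, and returns len(B) minus that maximum; no pairing of cards is ever constructed.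
import Mathlib
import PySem

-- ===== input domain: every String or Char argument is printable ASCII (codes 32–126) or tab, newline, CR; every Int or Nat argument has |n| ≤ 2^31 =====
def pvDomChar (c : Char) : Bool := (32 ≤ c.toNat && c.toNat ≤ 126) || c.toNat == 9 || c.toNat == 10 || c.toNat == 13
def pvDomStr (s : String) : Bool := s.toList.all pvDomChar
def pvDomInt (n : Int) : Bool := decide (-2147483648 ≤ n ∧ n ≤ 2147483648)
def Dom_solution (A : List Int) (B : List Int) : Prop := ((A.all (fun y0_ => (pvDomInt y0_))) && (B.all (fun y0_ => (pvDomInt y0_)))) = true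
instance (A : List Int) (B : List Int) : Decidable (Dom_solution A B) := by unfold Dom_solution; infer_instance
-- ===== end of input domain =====

-- B replaces A's greedy matching scan with a Hall-deficiency computation (binary-search
-- counts, maximum overload over prefixes of sorted B); objective: alternative, same
-- O(n log n) cost. Both Pythons sort A and B ascending IN PLACE; the equivalence proved
-- here is about the RETURN value only (the side effect on the arguments is identical).

-- ===== PORT A =====
-- A's while loop over indices i (into sorted A) and j (into sorted B); the two indices
-- only grow, so the loop is transcribed structurally on the remaining suffixes
-- A[i:], B[j:]: the heads are Python's A[i], B[j], and each branch advances exactly the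
-- indices the Python advances (both on a match, only j otherwise).
def solLoopA : List Int → List Int → Int → Int
  | a :: as, b :: bs, answer =>
      if b > a then solLoopA as bs (answer + 1)   -- i += 1; j += 1; answer += 1
      else solLoopA (a :: as) bs answer           -- j += 1
  | _, _, answer => answer                        -- i = len(A) or j = len(B): loop ends
termination_by _ ys _ => ys.length

def solution (A : List Int) (B : List Int) : Int :=
  solLoopA (PySem.List.sorted A (fun x => x) false) (PySem.List.sorted B (fun x => x) false) 0

-- ===== PORT B =====
-- Source B's inner binary search: lo, hi walk towards the number of A cards < b.
-- lo, hi only hold values in [0, len(A)], so they are Nat; (lo+hi)//2 on naturals is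
-- Python's floor division; getD is read only under mid < hi ≤ len(A). The while loop
-- is made total with a fuel argument (the interval width shrinks by at least one per
-- iteration, so fuel = len(A) at the top call never runs out): same computation.
def cntLoopB (As : List Int) (b : Int) : Nat → Nat → Nat → Nat
  | 0, lo, _ => lo
  | fuel + 1, lo, hi =>
      if lo < hi then
        let mid := (lo + hi) / 2
        if As.getD mid 0 < b then cntLoopB As b fuel (mid + 1) hi
        else cntLoopB As b fuel lo mid
      else lo

-- Source B's for loop over enumerate(B): j is the enumeration index, worst the running max.
def worstLoopB (As : List Int) : List Int → Nat → Int → Int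
  | [], _, worst => worst
  | b :: bs, j, worst =>
      let lo := cntLoopB As b As.length 0 As.length
      let d : Int := ((j : Int) + 1) - (lo : Int)
      worstLoopB As bs (j + 1) (if d > worst then d else worst)

def solution_alt (A : List Int) (B : List Int) : Int :=
  ((PySem.List.sorted B (fun x => x) false).length : Int) -
    worstLoopB (PySem.List.sorted A (fun x => x) false)
      (PySem.List.sorted B (fun x => x) false) 0 0

-- ===== PRECONDITION & SPEC =====
def Spec_solution (A : List Int) (B : List Int) (out : Int) : Prop := out = solution_alt A B
instance (A : List Int) (B : List Int) (out : Int) : Decidable (Spec_solution A B out) := by unfold Spec_solution; infer_instance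

-- ===== CLAIM (what is proved, stated in full; the proofs are below) =====
def Claim_equal_solution : Prop := ∀ (A : List Int) (B : List Int), Dom_solution A B → Spec_solution A B (solution A B)

-- ===== LEMMAS AND PROOFS =====

-- A's loop with the accumulator split off
def fGreedy : List Int → List Int → Int
  | _, [] => 0
  | [], _ :: _ => 0
  | a :: as, b :: bs =>
    if b > a then 1 + fGreedy as bs else fGreedy (a :: as) bs
termination_by _ ys => ys.length

theorem fGreedy_nil_left (B : List Int) : fGreedy [] B = 0 := by
  cases B <;> simp [fGreedy]

theorem solLoopA_eq_fGreedy :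
    ∀ (Bs As : List Int) (answer : Int), solLoopA As Bs answer = answer + fGreedy As Bs := by
  intro Bs
  induction Bs with
  | nil => intro As answer; cases As <;> simp [solLoopA, fGreedy]
  | cons b bs ih =>
    intro As answer
    cases As with
    | nil => simp [solLoopA, fGreedy_nil_left]
    | cons a as =>
      simp only [solLoopA, fGreedy]
      split_ifs with h
      · rw [ih]; ring
      · rw [ih]

-- number of A cards strictly below b
def cntLt (As : List Int) (b : Int) : Nat := As.countP (fun a => decide (a < b))

-- in a sorted list, the cards below b form a prefix: position i is below b iff i < cntLt
theorem sorted_lt_iff_lt_cnt (As : List Int) (hA : As.Pairwise (· ≤ ·)) (b : Int)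
    (i : Nat) (hi : i < As.length) : As[i] < b ↔ i < cntLt As b := by
  induction As generalizing i with
  | nil => simp at hi
  | cons a as ih =>
    obtain ⟨hmin, hA'⟩ := List.pairwise_cons.mp hA
    by_cases hab : a < b
    · have hc : cntLt (a :: as) b = cntLt as b + 1 := by
        simp [cntLt, hab]
      cases i with
      | zero => simpa [hc] using hab
      | succ k =>
        have hk : k < as.length := by simpa using hi
        have := ih hA' k hk
        simp only [List.getElem_cons_succ, hc]
        omega
    · have hz : cntLt as b = 0 := by
        rw [cntLt, List.countP_eq_zero]
        intro x hx
        have := hmin x hx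
        simp only [decide_eq_true_eq]
        omega
      have hc : cntLt (a :: as) b = 0 := by
        rw [cntLt, List.countP_eq_zero]
        intro x hx
        simp only [decide_eq_true_eq]
        rcases List.mem_cons.mp hx with rfl | hx'
        · omega
        · have := hmin x hx'; omega
      cases i with
      | zero => simpa [hc] using hab
      | succ k =>
        have hk : k < as.length := by simpa using hi
        have hx : as[k] ∈ as := List.getElem_mem hk
        have := hmin as[k] hx
        simp only [List.getElem_cons_succ, hc]
        omega

-- the binary search converges to cntLt (fuel bounds the interval width)
theorem cntLoopB_eq_cnt (As : List Int) (hA : As.Pairwise (· ≤ ·)) (b : Int) :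
    ∀ (fuel lo hi : Nat), hi - lo ≤ fuel → lo ≤ cntLt As b → cntLt As b ≤ hi →
      hi ≤ As.length → cntLoopB As b fuel lo hi = cntLt As b := by
  intro fuel
  induction fuel with
  | zero => intro lo hi hf h1 h2 _; simp only [cntLoopB]; omega
  | succ fuel ih =>
    intro lo hi hf h1 h2 h3
    simp only [cntLoopB]
    split_ifs with h hlt
    · have hmidlt : (lo + hi) / 2 < As.length := by omega
      have hg : As.getD ((lo + hi) / 2) 0 = As[(lo + hi) / 2] := by
        simp [List.getD_eq_getElem?_getD, hmidlt]
      have hm : (lo + hi) / 2 < cntLt As b :=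
        (sorted_lt_iff_lt_cnt As hA b ((lo + hi) / 2) hmidlt).mp (by rw [← hg]; exact hlt)
      exact ih _ hi (by omega) (by omega) h2 h3
    · have hmidlt : (lo + hi) / 2 < As.length := by omega
      have hg : As.getD ((lo + hi) / 2) 0 = As[(lo + hi) / 2] := by
        simp [List.getD_eq_getElem?_getD, hmidlt]
      have hm : cntLt As b ≤ (lo + hi) / 2 := by
        by_contra hcon
        exact hlt (by
          rw [hg]
          exact (sorted_lt_iff_lt_cnt As hA b ((lo + hi) / 2) hmidlt).mpr (by omega))
      exact ih lo _ (by omega) h1 hm (by omega)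
    · omega

theorem cntLt_le_length (As : List Int) (b : Int) : cntLt As b ≤ As.length :=
  List.countP_le_length

-- the deficiency sweep with counts written directly (the mathematical form of B's loop)
def mWorst (As : List Int) : List Int → Nat → Int → Int
  | [], _, w => w
  | b :: bs, j, w => mWorst As bs (j + 1) (max w (((j : Int) + 1) - (cntLt As b : Int)))

theorem worstLoopB_eq_mWorst (As : List Int) (hA : As.Pairwise (· ≤ ·)) :
    ∀ (Bs : List Int) (j : Nat) (w : Int), worstLoopB As Bs j w = mWorst As Bs j w := by
  intro Bs
  induction Bs with
  | nil => intro j w; rfl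
  | cons b bs ih =>
    intro j w
    have hc := cntLoopB_eq_cnt As hA b As.length 0 As.length (by omega)
      (Nat.zero_le _) (cntLt_le_length As b) (le_refl _)
    simp only [worstLoopB, mWorst, hc]
    rw [ih]
    congr 1
    by_cases h : (((j : Int) + 1) - (cntLt As b : Int)) > w
    · rw [if_pos h, max_eq_right (le_of_lt h)]
    · rw [if_neg h, max_eq_left (not_lt.mp h)]

-- shifting: a smallest A card below every remaining B card cancels one unit of offset
theorem mWorst_cons_lt (a : Int) (as : List Int) :
    ∀ (bs : List Int) (j : Nat) (w : Int), (∀ v ∈ bs, a < v) →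
      mWorst (a :: as) bs (j + 1) w = mWorst as bs j w := by
  intro bs
  induction bs with
  | nil => intro j w _; rfl
  | cons v vs ih =>
    intro j w hlt
    have hv : a < v := hlt v (by simp)
    have hc : cntLt (a :: as) v = cntLt as v + 1 := by
      simp [cntLt, hv]
    simp only [mWorst, hc]
    have harg : max w ((((j + 1 : Nat) : Int)) + 1 - ((cntLt as v + 1 : Nat) : Int)) =
        max w (((j : Nat) : Int) + 1 - ((cntLt as v : Nat) : Int)) := by
      congr 1
      push_cast
      ring
    rw [harg]
    exact ih (j + 1) _ (fun x hx => hlt x (by simp [hx]))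

-- shifting the offset and the accumulator together adds one to the result
theorem mWorst_succ (As : List Int) :
    ∀ (bs : List Int) (j : Nat) (w : Int), mWorst As bs (j + 1) (w + 1) = mWorst As bs j w + 1 := by
  intro bs
  induction bs with
  | nil => intro j w; rfl
  | cons v vs ih =>
    intro j w
    simp only [mWorst]
    have e1 : (((j + 1 : Nat) : Int) + 1 - (cntLt As v : Int)) =
        (((j : Nat) : Int) + 1 - (cntLt As v : Int)) + 1 := by push_cast; ring
    rw [e1]
    have e2 : max (w + 1) ((((j : Nat) : Int) + 1 - (cntLt As v : Int)) + 1) =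
        max w (((j : Nat) : Int) + 1 - (cntLt As v : Int)) + 1 := by
      rcases le_total w (((j : Nat) : Int) + 1 - (cntLt As v : Int)) with h | h
      · rw [max_eq_right h, max_eq_right (by omega)]
      · rw [max_eq_left h, max_eq_left (by omega)]
    rw [e2, ih]

-- MAIN LEMMA: on ascending sorted lists the greedy count equals |B| minus the maximal
-- Hall deficiency
theorem fGreedy_eq_sub_mWorst :
    ∀ (Bs As : List Int), As.Pairwise (· ≤ ·) → Bs.Pairwise (· ≤ ·) →
      fGreedy As Bs = (Bs.length : Int) - mWorst As Bs 0 0 := by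
  intro Bs
  induction Bs with
  | nil => intro As _ _; cases As <;> simp [fGreedy, mWorst]
  | cons b bs ih =>
    intro As hA hB
    obtain ⟨hbmin, hB'⟩ := List.pairwise_cons.mp hB
    by_cases hbeat : ∃ a as, As = a :: as ∧ a < b
    · obtain ⟨a, as, rfl, hab⟩ := hbeat
      obtain ⟨hamin, hA'⟩ := List.pairwise_cons.mp hA
      have hc : cntLt (a :: as) b = cntLt as b + 1 := by
        simp [cntLt, hab]
      have hzero : max (0 : Int) (((0 : Nat) : Int) + 1 - (cntLt (a :: as) b : Int)) = 0 := by
        rw [max_eq_left]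
        rw [hc]
        push_cast
        omega
      have hlt : ∀ v ∈ bs, a < v := fun v hv => lt_of_lt_of_le hab (hbmin v hv)
      simp only [fGreedy, if_pos hab, mWorst]
      rw [hzero, show ((0 : Nat) + 1 : Nat) = 0 + 1 from rfl, mWorst_cons_lt a as bs 0 0 hlt,
        ih as hA' hB']
      simp only [List.length_cons]
      push_cast
      ring
    · -- every A card is ≥ b (or A is empty): b is skipped, deficiency grows by one
      have hge : ∀ x ∈ As, b ≤ x := by
        intro x hx
        cases As with
        | nil => simp at hx
        | cons a as =>
          obtain ⟨hamin, _⟩ := List.pairwise_cons.mp hA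
          have hba : b ≤ a := by
            by_contra hcon
            exact hbeat ⟨a, as, rfl, by omega⟩
          rcases List.mem_cons.mp hx with rfl | hx'
          · exact hba
          · exact le_trans hba (hamin x hx')
      have hc : cntLt As b = 0 := by
        rw [cntLt, List.countP_eq_zero]
        intro x hx
        have := hge x hx
        simp only [decide_eq_true_eq]
        omega
      have hskip : fGreedy As (b :: bs) = fGreedy As bs := by
        cases As with
        | nil => rw [fGreedy_nil_left, fGreedy_nil_left]
        | cons a as =>
          have : ¬ (b > a) := by have := hge a (by simp); omega
          simp [fGreedy, this]
      have hone : max (0 : Int) (((0 : Nat) : Int) + 1 - (cntLt As b : Int)) = 0 + 1 := by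
        rw [hc]; simp
      simp only [mWorst]
      rw [hone, show ((0 : Nat) + 1 : Nat) = 0 + 1 from rfl, mWorst_succ As bs 0 0,
        hskip, ih As hA hB']
      simp only [List.length_cons]
      push_cast
      ring

-- ===== VERDICT (by name: the statement is the Claim_ definition above) =====
theorem solution_spec : Claim_equal_solution := by
  intro A B _
  unfold Spec_solution solution solution_alt
  have hA : (PySem.List.sorted A (fun x => x) false).Pairwise (· ≤ ·) := by
    simpa using PySem.List.sorted_pairwise A (fun x => x)
  have hB : (PySem.List.sorted B (fun x => x) false).Pairwise (· ≤ ·) := by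
    simpa using PySem.List.sorted_pairwise B (fun x => x)
  rw [solLoopA_eq_fGreedy, zero_add, fGreedy_eq_sub_mWorst _ _ hA hB,
    worstLoopB_eq_mWorst _ hA]
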